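-- pv_equiv track=rewrite | github.com/DDloving0113/Python-Learning-Journey | ex08_log_file_analyzer.py | stat_daily_unique_visitors
-- ===== SOURCE A (Python) =====
-- def stat_daily_unique_visitors(logs):
--     """
--     统计每一天有多少“不同用户”访问
--     返回：[('2026-02-21', 2), ('2026-02-22', 2)] (按日期从早到晚排序)
--     """
--     log_dict = {}
--     output_dict = {}
--     for i in logs:
--        if i["date"] not in log_dict:
--            log_dict[i["date"]] = set()
--        log_dict[i["date"]].add(i["user"])
--     for i,j in log_dict.items():
--         output_dict[i] = len(j)
--
--     # 使用 sorted + lambda 按日期排序 (从早到晚)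
--     # 日期字符串可以直接比较，所以 key 选日期 x[0]
--     return sorted(output_dict.items(), key=lambda x: x[0])
-- ===== SOURCE B (Python) =====
-- def stat_daily_unique_visitors(logs):
--     dates = sorted({e["date"] for e in logs})
--     return [(d, len({e["user"] for e in logs if e["date"] == d})) for d in dates]
-- ===== Notes on version B (the rewrite author's own statement) =====
-- stated objective: simpler
-- what changed: Replaces the dict-of-sets accumulation plus second counting dict plus final sort by a two-liner: sort the distinct dates once, then for each date count the distinct users with a nested scan.
import Mathlib
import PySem

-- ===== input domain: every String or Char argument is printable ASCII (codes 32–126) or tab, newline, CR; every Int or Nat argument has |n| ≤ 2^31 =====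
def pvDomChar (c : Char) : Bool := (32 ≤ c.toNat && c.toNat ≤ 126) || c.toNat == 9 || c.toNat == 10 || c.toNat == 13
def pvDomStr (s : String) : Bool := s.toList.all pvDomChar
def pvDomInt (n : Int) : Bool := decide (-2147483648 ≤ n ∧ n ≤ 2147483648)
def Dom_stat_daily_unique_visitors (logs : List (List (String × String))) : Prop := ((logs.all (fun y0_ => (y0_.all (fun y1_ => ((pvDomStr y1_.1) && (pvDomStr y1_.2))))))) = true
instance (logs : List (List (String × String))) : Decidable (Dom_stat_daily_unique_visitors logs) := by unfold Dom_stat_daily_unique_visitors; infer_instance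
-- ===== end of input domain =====

-- B replaces A's dict-of-sets accumulation + second dict + final sort by sorting the
-- distinct dates once and counting distinct users per date with a nested scan (simpler, not faster).


-- i["k"] on the entry dict (assoc list, first match); total form used by both ports,
-- exact on Pre_ (where the key is present)
def pvGet (e : List (String × String)) (k : String) : String :=
  ((PySem.Dict.mk e).get? k).getD ""

-- ===== PORT A =====
def stat_daily_unique_visitors (logs : List (List (String × String))) : List (String × Int) :=
  let log_dict : PySem.Dict String (PySem.Set String) :=
    logs.foldl (fun d i =>
      let t := pvGet i "date"
      let d := if d.contains t then d else d.insert t PySem.Set.empty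
      d.modify t PySem.Set.empty (fun s => PySem.Set.add s (pvGet i "user")))
      PySem.Dict.empty
  let output_dict : PySem.Dict String Int :=
    log_dict.items.foldl (fun od p => od.insert p.1 (PySem.Set.len p.2)) PySem.Dict.empty
  PySem.List.sorted output_dict.items (fun x => x.1) false

-- ===== PORT B =====
def stat_daily_unique_visitors_alt (logs : List (List (String × String))) : List (String × Int) :=
  let dates := PySem.List.sorted (PySem.Set.ofList (logs.map (fun e => pvGet e "date"))) (fun x => x) false
  dates.map (fun d =>
    (d, PySem.Set.len (PySem.Set.ofList
          ((logs.filter (fun e => pvGet e "date" == d)).map (fun e => pvGet e "user")))))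

-- ===== PRECONDITION & SPEC =====
-- Pre_ excludes exactly the inputs where A raises KeyError: an entry without a "date" or "user" key.
def Pre_stat_daily_unique_visitors (logs : List (List (String × String))) : Prop :=
  (logs.all (fun e => ((PySem.Dict.mk e).get? "date").isSome && ((PySem.Dict.mk e).get? "user").isSome)) = true
instance (logs : List (List (String × String))) : Decidable (Pre_stat_daily_unique_visitors logs) := by unfold Pre_stat_daily_unique_visitors; infer_instance
def pvWitness_stat_daily_unique_visitors : (List (List (String × String))) :=
  [[("date", "2026-02-21"), ("user", "alice")], [("date", "2026-02-21"), ("user", "bob")]]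

def Spec_stat_daily_unique_visitors (logs : List (List (String × String))) (out : List (String × Int)) : Prop := out = stat_daily_unique_visitors_alt logs
instance (logs : List (List (String × String))) (out : List (String × Int)) : Decidable (Spec_stat_daily_unique_visitors logs out) := by unfold Spec_stat_daily_unique_visitors; infer_instance

-- ===== CLAIM (what is proved, stated in full; the proofs are below) =====
def Claim_equal_stat_daily_unique_visitors : Prop := ∀ (logs : List (List (String × String))), Dom_stat_daily_unique_visitors logs → Pre_stat_daily_unique_visitors logs → Spec_stat_daily_unique_visitors logs (stat_daily_unique_visitors logs)

-- ===== LEMMAS AND PROOFS =====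

-- A's inner loop body, named for the proofs (definitionally equal to the lambda in port A)
def stepA (d : PySem.Dict String (PySem.Set String)) (i : List (String × String)) :
    PySem.Dict String (PySem.Set String) :=
  let t := pvGet i "date"
  let d := if d.contains t then d else d.insert t PySem.Set.empty
  d.modify t PySem.Set.empty (fun s => PySem.Set.add s (pvGet i "user"))

theorem set_contains_keys (d : PySem.Dict String (PySem.Set String)) (k : String) :
    PySem.Set.contains d.keys k = d.contains k := by
  rw [Bool.eq_iff_iff]
  simp [PySem.Set.contains, PySem.Dict.contains_iff_mem_keys]

theorem stepA_getD (d : PySem.Dict String (PySem.Set String)) (i : List (String × String)) (t : String) :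
    (stepA d i).getD t PySem.Set.empty =
      if pvGet i "date" = t then PySem.Set.add (d.getD t PySem.Set.empty) (pvGet i "user")
      else d.getD t PySem.Set.empty := by
  simp only [stepA]
  by_cases hc : d.contains (pvGet i "date") = true
  · rw [if_pos hc, PySem.Dict.getD_modify]
    by_cases he : t = pvGet i "date"
    · rw [if_pos he, if_pos he.symm, he]
    · rw [if_neg he, if_neg (fun h => he h.symm)]
  · have hc' : d.contains (pvGet i "date") = false := by simpa using hc
    rw [if_neg hc, PySem.Dict.getD_modify]
    by_cases he : t = pvGet i "date"
    · rw [if_pos he, if_pos he.symm, he, PySem.Dict.getD_insert_self,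
        PySem.Dict.getD_of_not_contains d _ hc']
    · rw [if_neg he, if_neg (fun h => he h.symm), PySem.Dict.getD_insert, if_neg he]

theorem foldA_getD (logs : List (List (String × String)))
    (d : PySem.Dict String (PySem.Set String)) (t : String) :
    (logs.foldl stepA d).getD t PySem.Set.empty =
      PySem.Set.update (d.getD t PySem.Set.empty)
        (((logs.filter (fun e => pvGet e "date" == t)).map (fun e => pvGet e "user"))) := by
  induction logs generalizing d with
  | nil => simp [PySem.Set.update]
  | cons e rest ih =>
    simp only [List.foldl_cons, List.filter_cons]
    rw [ih, stepA_getD]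
    by_cases he : pvGet e "date" = t <;> simp [he, PySem.Set.update]

theorem stepA_keys (d : PySem.Dict String (PySem.Set String)) (i : List (String × String)) :
    (stepA d i).keys = PySem.Set.add d.keys (pvGet i "date") := by
  have hck := set_contains_keys d (pvGet i "date")
  simp only [stepA]
  by_cases hc : d.contains (pvGet i "date") = true
  · rw [if_pos hc, PySem.Dict.keys_modify, PySem.Dict.keys_insert_of_contains _ _ hc,
      PySem.Set.add, if_pos (by rw [hck]; exact hc)]
  · have hc' : d.contains (pvGet i "date") = false := by simpa using hc
    rw [if_neg hc, PySem.Dict.keys_modify,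
      PySem.Dict.keys_insert_of_contains _ _ (PySem.Dict.contains_insert_self d _ _),
      PySem.Dict.keys_insert_of_not_contains _ _ hc',
      PySem.Set.add, if_neg (by rw [hck, hc']; simp)]

theorem foldA_keys (logs : List (List (String × String)))
    (d : PySem.Dict String (PySem.Set String)) :
    (logs.foldl stepA d).keys = PySem.Set.update d.keys (logs.map (fun e => pvGet e "date")) := by
  induction logs generalizing d with
  | nil => simp [PySem.Set.update]
  | cons e rest ih => simp [PySem.Set.update, stepA_keys, ih]

theorem stat_daily_unique_visitors_spec' (logs : List (List (String × String))) :
    stat_daily_unique_visitors logs = stat_daily_unique_visitors_alt logs := by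
  show PySem.List.sorted
      ((List.foldl stepA PySem.Dict.empty logs).items.foldl
        (fun od p => od.insert p.1 (PySem.Set.len p.2)) PySem.Dict.empty).items
      (fun x => x.1) false
    = (PySem.List.sorted (PySem.Set.ofList (logs.map (fun e => pvGet e "date"))) (fun x => x) false).map
        (fun d => (d, PySem.Set.len (PySem.Set.ofList
          ((logs.filter (fun e => pvGet e "date" == d)).map (fun e => pvGet e "user")))))
  set L := logs.foldl stepA PySem.Dict.empty with hL
  have hkeys : L.keys = PySem.Set.ofList (logs.map (fun e => pvGet e "date")) := by
    rw [hL, foldA_keys]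
    simp [PySem.Set.update, PySem.Set.ofList_eq_foldl, PySem.Dict.keys_empty]
  have hnd : L.keys.Nodup := by rw [hkeys]; exact PySem.Set.nodup_ofList _
  have hout : (L.items.foldl (fun od p => od.insert p.1 (PySem.Set.len p.2)) PySem.Dict.empty).items
      = L.items.map (fun p => (p.1, PySem.Set.len p.2)) := by
    rw [PySem.Dict.items_foldl_insert_fresh L.items (fun p => p.1) (fun p => PySem.Set.len p.2)
      PySem.Dict.empty (fun a _ => PySem.Dict.contains_empty _) hnd]
    rfl
  rw [hout]
  have hval : ∀ t, L.getD t PySem.Set.empty =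
      PySem.Set.ofList ((logs.filter (fun e => pvGet e "date" == t)).map (fun e => pvGet e "user")) := by
    intro t
    rw [hL, foldA_getD]
    rw [PySem.Set.ofList_eq_foldl, PySem.Set.update, PySem.Dict.getD_empty]
    rfl
  rw [PySem.Dict.items_eq_map_keys L hnd PySem.Set.empty, hkeys]
  set D := PySem.Set.ofList (logs.map (fun e => pvGet e "date")) with hD
  set f : String → String × Int := fun t =>
    (t, PySem.Set.len (PySem.Set.ofList
      ((logs.filter (fun e => pvGet e "date" == t)).map (fun e => pvGet e "user")))) with hf
  have hmapmap : (D.map (fun k => (k, L.getD k PySem.Set.empty))).map (fun p => (p.1, PySem.Set.len p.2))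
      = D.map f := by
    rw [List.map_map]; apply List.map_congr_left; intro t _
    show (t, PySem.Set.len (L.getD t PySem.Set.empty)) = f t
    rw [hval t]
  rw [hmapmap]
  apply PySem.List.sorted_eq_of_perm_of_pairwise_lt
  · exact (PySem.List.sorted_perm D (fun x => x) false).map f
  · have hpw : List.Pairwise (fun a b => a < b) (PySem.List.sorted D (fun x => x)) := by
      rw [hD]; exact PySem.List.sorted_ofList_pairwise_lt _
    exact List.Pairwise.map f (fun a b h => h) hpw

-- ===== VERDICT (by name: the statement is the Claim_ definition above) =====
theorem stat_daily_unique_visitors_spec : Claim_equal_stat_daily_unique_visitors := by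
  intro logs _ _
  exact stat_daily_unique_visitors_spec' logs
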